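-- pv_equiv track=rewrite | github.com/akimi-yano/algorithm-practice | EPI/4.1_computing_the_party_of_a_word.py | many_words
-- ===== SOURCE A (Python) =====
-- def single_word(s):
--     counter = 0
--     for c in s:
--         if c=="1":
--             counter+=1
--     if counter%2==0:
--         return 0
--     else:
--         return 1
--
-- def many_words(arr):
--     count_0=0
--     count_1=0
--     for s in arr:
--         ans = single_word(s)
--         if ans == 0:
--             count_0+=1
--         else:
--             count_1+=1
--     if count_1%2==0:
--         return 0
--     else:
--         return 1
-- ===== SOURCE B (Python) =====
-- def many_words(arr):
--     total = 0
--     for s in arr: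
--         for c in s:
--             if c == "1":
--                 total += 1
--     return total % 2
-- ===== Notes on version B (the rewrite author's own statement) =====
-- stated objective: simpler
-- what changed: Replaces the per-word parity helper and the two bucket counters with one flat count of '1' characters across all words, returning that total mod 2 (parity of a sum of parities equals parity of the sum).
import Mathlib
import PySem

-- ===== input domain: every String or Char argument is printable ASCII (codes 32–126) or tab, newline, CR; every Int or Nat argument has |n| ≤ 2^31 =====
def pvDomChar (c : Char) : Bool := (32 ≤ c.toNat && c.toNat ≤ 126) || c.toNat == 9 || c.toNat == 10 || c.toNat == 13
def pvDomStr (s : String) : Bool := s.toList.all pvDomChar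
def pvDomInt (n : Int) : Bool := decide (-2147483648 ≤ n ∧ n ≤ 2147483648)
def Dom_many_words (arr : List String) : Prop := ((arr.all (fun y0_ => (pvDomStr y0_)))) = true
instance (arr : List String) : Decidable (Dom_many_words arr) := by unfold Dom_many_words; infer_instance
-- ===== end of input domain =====

-- B replaces A's per-word parity helper and two bucket counters by one flat count of '1'
-- characters with a final mod 2 (simpler decomposition; same exact result).

-- ===== PORT A =====
def single_word (s : String) : Int :=
  let counter := s.toList.foldl (fun counter c => if c == '1' then counter + 1 else counter) (0 : Int)
  if PySem.Int.mod counter 2 == 0 then 0 else 1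

def many_words (arr : List String) : Int :=
  let p := arr.foldl
    (fun (p : Int × Int) s =>
      let ans := single_word s
      if ans == 0 then (p.1 + 1, p.2) else (p.1, p.2 + 1))
    (0, 0)
  if PySem.Int.mod p.2 2 == 0 then 0 else 1

-- ===== PORT B =====
def many_words_alt (arr : List String) : Int :=
  let total := arr.foldl
    (fun total s => s.toList.foldl (fun total c => if c == '1' then total + 1 else total) total)
    (0 : Int)
  PySem.Int.mod total 2

-- ===== PRECONDITION & SPEC =====
def Spec_many_words (arr : List String) (out : Int) : Prop := out = many_words_alt arr
instance (arr : List String) (out : Int) : Decidable (Spec_many_words arr out) := by unfold Spec_many_words; infer_instance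

-- ===== CLAIM (what is proved, stated in full; the proofs are below) =====
def Claim_equal_many_words : Prop := ∀ (arr : List String), Dom_many_words arr → Spec_many_words arr (many_words arr)

-- ===== LEMMAS AND PROOFS =====

-- Python's % with the positive divisor 2 agrees with Lean's Euclidean %
theorem fmod_two_eq_emod (a : Int) : a.fmod 2 = a % 2 := by
  rw [Int.fmod_eq_emod]; simp

-- the number of '1' characters in one word, counted from an arbitrary start value
theorem ones_foldl_add (cs : List Char) (t : Int) :
    cs.foldl (fun total c => if c == '1' then total + 1 else total) t
      = t + cs.foldl (fun total c => if c == '1' then total + 1 else total) 0 := by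
  induction cs generalizing t with
  | nil => simp
  | cons c cs ih =>
    simp only [List.foldl_cons]
    rw [ih, ih (if c == '1' then 0 + 1 else 0)]
    split <;> ring

-- invariant: the parity of A's count_1 bucket tracks the parity of B's flat total
theorem bucket_parity (arr : List String) (p : Int × Int) (t : Int)
    (h : PySem.Int.mod p.2 2 = PySem.Int.mod t 2) :
    PySem.Int.mod (arr.foldl
      (fun (p : Int × Int) s =>
        let ans := single_word s
        if ans == 0 then (p.1 + 1, p.2) else (p.1, p.2 + 1)) p).2 2
    = PySem.Int.mod (arr.foldl
        (fun total s => s.toList.foldl (fun total c => if c == '1' then total + 1 else total) total)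
        t) 2 := by
  induction arr generalizing p t with
  | nil => simpa using h
  | cons s arr ih =>
    simp only [List.foldl_cons]
    apply ih
    rw [ones_foldl_add]
    set o := s.toList.foldl (fun total c => if c == '1' then total + 1 else total) (0 : Int) with ho
    have hsw : single_word s = if PySem.Int.mod o 2 == 0 then 0 else 1 := rfl
    rcases PySem.Int.mod_two_eq o with h0 | h1
    · have hs : single_word s = 0 := by rw [hsw, h0]; rfl
      simp only [hs, beq_self_eq_true, if_true]
      simp only [PySem.Int.mod, fmod_two_eq_emod] at *
      omega
    · have hs : single_word s = 1 := by rw [hsw, h1]; rfl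
      simp only [hs]
      norm_num
      simp only [PySem.Int.mod, fmod_two_eq_emod] at *
      omega

-- ===== VERDICT (by name: the statement is the Claim_ definition above) =====
theorem many_words_spec : Claim_equal_many_words := by
  intro arr _
  show many_words arr = many_words_alt arr
  unfold many_words many_words_alt
  dsimp only
  have h := bucket_parity arr (0, 0) 0 rfl
  rw [h]
  rcases PySem.Int.mod_two_eq (arr.foldl
      (fun total s => s.toList.foldl (fun total c => if c == '1' then total + 1 else total) total)
      (0 : Int)) with h0 | h1
  · rw [h0]; decide
  · rw [h1]; decide
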